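-- pv_equiv track=rewrite | github.com/alawein/alawein | organizations/alawein-technologies-llc/incubator/foundry/products/nightmare-mode/backend/orchestrator/ensemble.py | _parse_attacks_from_text
-- ===== SOURCE A (Python) =====
-- from typing import List, Dict, Tuple
--
-- def _parse_attacks_from_text(text: str, dimension: str, model: str) -> List[Dict]:
--     """
--     Parse individual attacks from model response.
--
--     Very simple parser for MVP - just split by numbers.
--     TODO: Use more robust parsing (regex, structured output)
--     """
--     attacks = []
--
--     # Simple split by "1.", "2.", etc.
--     lines = text.split("\n")
--     current_attack = ""
--
--     for line in lines:
--         # Check if line starts with number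
--         if line.strip() and line.strip()[0].isdigit() and "." in line[:3]:
--             # Save previous attack
--             if current_attack:
--                 attacks.append({
--                     'dimension': dimension,
--                     'model': model,
--                     'content': current_attack.strip(),
--                     'severity': 'High'  # TODO: Extract from text
--                 })
--             current_attack = line
--         else:
--             current_attack += " " + line
--
--     # Add final attack
--     if current_attack:
--         attacks.append({
--             'dimension': dimension,
--             'model': model,
--             'content': current_attack.strip(),
--             'severity': 'High'
--         })
--
--     return attacks
-- ===== SOURCE B (Python) =====
-- from typing import List, Dict
--
-- def _parse_attacks_from_text(text: str, dimension: str, model: str) -> List[Dict]: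
--     # Recursive divide-at-next-header strategy: locate the next numbered header,
--     # join the slice up to it in one step, and recurse on the remainder —
--     # no character accumulator and no flush logic.
--     def is_header(line):
--         s = line.strip()
--         return bool(s) and s[0].isdigit() and "." in line[:3]
--
--     def next_header(lines):
--         return next((i for i, l in enumerate(lines) if is_header(l)), len(lines))
--
--     def group(lines):
--         # lines is nonempty and lines[0] is a header line
--         j = 1 + next_header(lines[1:])
--         return [" ".join(lines[:j])] + (group(lines[j:]) if j < len(lines) else [])
--
--     lines = text.split("\n")
--     i = next_header(lines)
--     lead = [" " + " ".join(lines[:i])] if i else []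
--     chunks = lead + (group(lines[i:]) if i < len(lines) else [])
--     return [{'dimension': dimension, 'model': model,
--              'content': c.strip(), 'severity': 'High'} for c in chunks]
-- ===== Notes on version B (the rewrite author's own statement) =====
-- stated objective: alternative
-- what changed: B replaces A's single-pass character accumulator with flush-on-header by a recursive divide-and-conquer: find the index of the next numbered header, emit ' '.join of the whole slice up to it in one step, and recurse on the remaining lines.
import Mathlib
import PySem

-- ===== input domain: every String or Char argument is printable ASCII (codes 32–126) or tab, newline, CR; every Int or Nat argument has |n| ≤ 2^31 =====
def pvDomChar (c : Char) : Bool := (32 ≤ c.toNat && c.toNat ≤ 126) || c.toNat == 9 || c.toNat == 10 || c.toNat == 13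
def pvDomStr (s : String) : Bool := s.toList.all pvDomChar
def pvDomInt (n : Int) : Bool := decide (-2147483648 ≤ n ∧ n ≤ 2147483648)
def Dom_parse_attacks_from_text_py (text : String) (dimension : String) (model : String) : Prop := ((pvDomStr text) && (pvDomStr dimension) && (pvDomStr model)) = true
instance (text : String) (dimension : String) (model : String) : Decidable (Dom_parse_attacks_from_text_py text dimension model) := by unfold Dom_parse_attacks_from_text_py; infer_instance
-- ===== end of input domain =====

-- B replaces A's accumulate-and-flush single pass by a recursive divide-at-next-header (findIdx + join of the slice); objective: alternative, not faster.


-- ===== PORT A =====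
-- shared output record: the dict literal both Pythons build for one attack
def pvAttack (dimension model : String) (content : List Char) : List (String × String) :=
  [("dimension", dimension), ("model", model),
   ("content", String.ofList (PySem.Chars.strip content)), ("severity", "High")]

-- 'line.strip() and line.strip()[0].isdigit() and "." in line[:3]'
def pvIsHeaderA (line : List Char) : Bool :=
  match PySem.Chars.strip line with
  | [] => false
  | c :: _ => PySem.Chars.isdigit c && PySem.Chars.isIn ['.'] (PySem.List.slice line none (some (3 : Int)))

-- loop body of A: state = (attacks so far, current_attack)
def pvStepA (dimension model : String)
    (st : List (List (String × String)) × List Char) (line : List Char) :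
    List (List (String × String)) × List Char :=
  if pvIsHeaderA line then
    (if st.2 ≠ [] then st.1 ++ [pvAttack dimension model st.2] else st.1, line)
  else
    (st.1, st.2 ++ ' ' :: line)

def parse_attacks_from_text_py (text : String) (dimension : String) (model : String) : List (List (String × String)) :=
  let lines := PySem.Chars.splitOn text.toList ['\n']
  let fin := lines.foldl (pvStepA dimension model) ([], [])
  if fin.2 ≠ [] then fin.1 ++ [pvAttack dimension model fin.2] else fin.1

-- ===== PORT B =====
-- same header test, written for B's recursion
def pvIsHeaderB (line : List Char) : Bool :=
  match PySem.Chars.strip line with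
  | [] => false
  | c :: _ => PySem.Chars.isdigit c && PySem.Chars.isIn ['.'] (PySem.List.slice line none (some (3 : Int)))

-- '" ".join(parts)'
def pvJoinSp (parts : List (List Char)) : List Char := PySem.Chars.join [' '] parts

-- B's 'group': head line is a header; find the next header, join the slice, recurse on the rest
-- (next_header = List.findIdx: both return the length when no header is found)
def pvGroupB : List (List Char) → List (List Char)
  | [] => []
  | l :: tail =>
    let j := tail.findIdx pvIsHeaderB
    pvJoinSp (l :: tail.take j) :: pvGroupB (tail.drop j)
termination_by lines => lines.length
decreasing_by simp

def parse_attacks_from_text_py_alt (text : String) (dimension : String) (model : String) : List (List (String × String)) :=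
  let lines := PySem.Chars.splitOn text.toList ['\n']
  let i := lines.findIdx pvIsHeaderB
  let lead := if i ≠ 0 then [' ' :: pvJoinSp (lines.take i)] else []
  (lead ++ pvGroupB (lines.drop i)).map (pvAttack dimension model)

-- ===== PRECONDITION & SPEC =====
def Spec_parse_attacks_from_text_py (text : String) (dimension : String) (model : String) (out : List (List (String × String))) : Prop := out = parse_attacks_from_text_py_alt text dimension model
instance (text : String) (dimension : String) (model : String) (out : List (List (String × String))) : Decidable (Spec_parse_attacks_from_text_py text dimension model out) := by unfold Spec_parse_attacks_from_text_py; infer_instance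

-- ===== CLAIM (what is proved, stated in full; the proofs are below) =====
def Claim_equal_parse_attacks_from_text_py : Prop := ∀ (text : String) (dimension : String) (model : String), Dom_parse_attacks_from_text_py text dimension model → Spec_parse_attacks_from_text_py text dimension model (parse_attacks_from_text_py text dimension model)

-- ===== LEMMAS AND PROOFS =====

theorem pvIsHeader_eq : pvIsHeaderA = pvIsHeaderB := rfl

theorem pvHeader_ne_nil (l : List Char) (h : pvIsHeaderA l = true) : l ≠ [] := by
  rintro rfl; exact absurd h (by decide)

-- " ".join(x::xs) spelled as appends
theorem pvJoinSp_flat (x : List Char) (xs : List (List Char)) :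
    pvJoinSp (x :: xs) = x ++ xs.flatMap (fun l => ' ' :: l) := by
  induction xs generalizing x with
  | nil => simp [pvJoinSp, PySem.Chars.join_singleton]
  | cons y ys ih =>
    simp [pvJoinSp, PySem.Chars.join_cons_cons] at ih ⊢
    simp [ih y]

theorem pvGroupB_nil : pvGroupB [] = [] := by rw [pvGroupB.eq_def]

theorem pvGroupB_cons (l : List Char) (tail : List (List Char)) :
    pvGroupB (l :: tail) =
      pvJoinSp (l :: tail.take (tail.findIdx pvIsHeaderB)) :: pvGroupB (tail.drop (tail.findIdx pvIsHeaderB)) := by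
  rw [pvGroupB.eq_def]

-- reference chunking, recursive over the lines with A's accumulator
def pvChunksRec : List Char → List (List Char) → List (List Char)
  | cur, [] => if cur ≠ [] then [cur] else []
  | cur, l :: r =>
    if pvIsHeaderA l then
      (if cur ≠ [] then cur :: pvChunksRec l r else pvChunksRec l r)
    else pvChunksRec (cur ++ ' ' :: l) r

-- A's fold produces exactly the attacks of pvChunksRec
theorem pvFoldA_eq (dimension model : String) (lines : List (List Char))
    (acc : List (List (String × String))) (cur : List Char) :
    (if (lines.foldl (pvStepA dimension model) (acc, cur)).2 ≠ [] then
       (lines.foldl (pvStepA dimension model) (acc, cur)).1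
         ++ [pvAttack dimension model (lines.foldl (pvStepA dimension model) (acc, cur)).2]
     else (lines.foldl (pvStepA dimension model) (acc, cur)).1)
    = acc ++ (pvChunksRec cur lines).map (pvAttack dimension model) := by
  induction lines generalizing acc cur with
  | nil => by_cases hc : cur = [] <;> simp [pvChunksRec, hc]
  | cons l r ih =>
    simp only [List.foldl_cons, pvStepA]
    by_cases hH : pvIsHeaderA l = true
    · by_cases hc : cur = [] <;> simp [pvChunksRec, hH, hc, ih]
    · simp [pvChunksRec, hH, ih]

-- B's divide-at-next-header produces exactly pvChunksRec
theorem pvChunksRec_eq (lines : List (List Char)) (cur : List Char) :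
    pvChunksRec cur lines =
      (if cur ++ (lines.take (lines.findIdx pvIsHeaderA)).flatMap (fun l => ' ' :: l) ≠ [] then
         [cur ++ (lines.take (lines.findIdx pvIsHeaderA)).flatMap (fun l => ' ' :: l)]
       else [])
      ++ pvGroupB (lines.drop (lines.findIdx pvIsHeaderA)) := by
  induction lines generalizing cur with
  | nil => by_cases hc : cur = [] <;> simp [pvChunksRec, pvGroupB_nil, hc]
  | cons l r ih =>
    by_cases hH : pvIsHeaderA l = true
    · have hl := pvHeader_ne_nil l hH
      have hB : pvIsHeaderB l = true := by rw [← pvIsHeader_eq]; exact hH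
      have hg : pvGroupB (l :: r) = pvChunksRec l r := by
        rw [pvGroupB_cons, ih l]
        simp [← pvIsHeader_eq, pvJoinSp_flat, hl]
      simp only [pvChunksRec, hH, if_true, List.findIdx_cons, hB, cond_true,
        List.take_zero, List.drop_zero, List.flatMap_nil, List.append_nil, hg]
      by_cases hc : cur = [] <;> simp [hc]
    · have hB : pvIsHeaderB l = false := by rw [← pvIsHeader_eq]; simpa using hH
      rw [pvChunksRec]
      simp only [hH, if_false, List.findIdx_cons, hB, cond_false,
        List.take_succ_cons, List.drop_succ_cons, List.flatMap_cons, ih]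
      simp

-- the lead chunk tests agree: flatMap nonempty ↔ first header index nonzero
theorem pvLead_eq (lines : List (List Char)) :
    (if ([] : List Char) ++ (lines.take (lines.findIdx pvIsHeaderA)).flatMap (fun l => ' ' :: l) ≠ [] then
       [([] : List Char) ++ (lines.take (lines.findIdx pvIsHeaderA)).flatMap (fun l => ' ' :: l)]
     else [])
    = (if lines.findIdx pvIsHeaderB ≠ 0 then [' ' :: pvJoinSp (lines.take (lines.findIdx pvIsHeaderB))] else []) := by
  rw [pvIsHeader_eq]
  by_cases h0 : lines.findIdx pvIsHeaderB = 0
  · simp [h0]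
  · cases lines with
    | nil => simp at h0
    | cons x r =>
      obtain ⟨k, hk⟩ := Nat.exists_eq_succ_of_ne_zero h0
      simp [hk, pvJoinSp_flat]

-- ===== VERDICT (by name: the statement is the Claim_ definition above) =====
theorem parse_attacks_from_text_py_spec : Claim_equal_parse_attacks_from_text_py := by
  intro text dimension model _
  unfold Spec_parse_attacks_from_text_py parse_attacks_from_text_py parse_attacks_from_text_py_alt
  have hA := pvFoldA_eq dimension model (PySem.Chars.splitOn text.toList ['\n']) [] []
  simp only [List.nil_append] at hA
  rw [hA, pvChunksRec_eq, pvLead_eq]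
  try rw [pvIsHeader_eq]
  try simp [pvIsHeader_eq]
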